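-- pv_equiv track=rewrite | github.com/ballsnuga-crypto/bott | funny_cog.py | _snippet_for_user
-- ===== SOURCE A (Python) =====
-- def _snippet_for_user(log: str, uid: int, max_len: int = 220) -> str:
--     prefix = f"{uid}\t"
--     for line in log.split("\n"):
--         if not line.startswith(prefix):
--             continue
--         rest = line[len(prefix) :]
--         tab = rest.find("\t")
--         if tab < 0:
--             continue
--         body = rest[tab + 1 :].strip()
--         if body:
--             return body[:max_len] + ("…" if len(body) > max_len else "")
--     return "—"
-- ===== SOURCE B (Python) =====
-- def _snippet_for_user(log: str, uid: int, max_len: int = 220) -> str: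
--     # Substring search: jump straight to candidate lines via find("\n{uid}\t")
--     # on a "\n"-padded log, instead of splitting the log into lines.
--     marker = f"\n{uid}\t"
--     s = "\n" + log
--     while True:
--         p = s.find(marker)
--         if p < 0:
--             return "—"
--         s = s[p + len(marker):]
--         nl = s.find("\n")
--         line = s if nl < 0 else s[:nl]
--         tab = line.find("\t")
--         if tab >= 0:
--             body = line[tab + 1:].strip()
--             if body:
--                 return body[:max_len] + ("…" if len(body) > max_len else "")
-- ===== Notes on version B (the rewrite author's own statement) =====
-- stated objective: alternative
-- what changed: Instead of splitting the log into lines and parsing each line with startswith/find, B pads the log with a leading newline and repeatedly substring-searches for the marker '\n{uid}\t', jumping directly to candidate lines and slicing the remainder of the matched line out by the next newline.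
import Mathlib
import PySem

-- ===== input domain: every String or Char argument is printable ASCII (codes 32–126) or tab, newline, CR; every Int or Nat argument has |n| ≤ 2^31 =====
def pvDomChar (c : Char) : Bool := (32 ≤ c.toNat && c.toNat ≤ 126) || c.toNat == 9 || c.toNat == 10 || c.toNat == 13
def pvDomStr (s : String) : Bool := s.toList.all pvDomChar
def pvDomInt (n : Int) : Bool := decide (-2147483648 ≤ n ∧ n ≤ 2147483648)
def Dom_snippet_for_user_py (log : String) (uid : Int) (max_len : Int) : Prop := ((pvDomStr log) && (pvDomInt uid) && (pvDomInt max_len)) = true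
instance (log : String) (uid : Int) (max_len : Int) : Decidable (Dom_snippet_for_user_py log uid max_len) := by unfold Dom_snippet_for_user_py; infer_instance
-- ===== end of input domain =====

-- B replaces A's split-into-lines scan by a substring search for the marker "\n{uid}\t" over a "\n"-padded log (objective: alternative).

-- ===== PORT A =====
-- A's loop over the lines of log: startswith-prefix check, find the second tab, slice out the body.
def snipA_go (pre : List Char) (max_len : Int) : List (List Char) → List Char
  | [] => ['—']
  | line :: rest =>
    if PySem.Chars.startswith line pre then
      let r := PySem.List.slice line (some ((pre.length : Nat) : Int)) none
      let tab := PySem.Chars.find r ['\t']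
      if tab < 0 then snipA_go pre max_len rest
      else
        let body := PySem.Chars.strip (PySem.List.slice r (some (tab + 1)) none)
        if body.isEmpty then snipA_go pre max_len rest
        else PySem.List.slice body none (some max_len) ++ (if max_len < (body.length : Int) then ['…'] else [])
    else snipA_go pre max_len rest

def snippet_for_user_py (log : String) (uid : Int) (max_len : Int) : String :=
  String.ofList (snipA_go (PySem.Int.toChars uid ++ ['\t']) max_len (PySem.Chars.splitOn log.toList ['\n']))

-- ===== PORT B =====
-- B's while loop: p = s.find(marker); '—' when absent, else cut s to the suffix after the
-- marker, slice the rest of the matched line out by the next '\n', and test its second field.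
def snipB_loop (key : List Char) (max_len : Int) (s : List Char) : List Char :=
  let marker := '\n' :: (key ++ ['\t'])
  let p := PySem.Chars.find s marker
  if p < 0 then ['—']
  else
    let s' := PySem.List.slice s (some (p + (marker.length : Int))) none
    let nl := PySem.Chars.find s' ['\n']
    let line := if nl < 0 then s' else PySem.List.slice s' none (some nl)
    let tab := PySem.Chars.find line ['\t']
    if 0 ≤ tab then
      let body := PySem.Chars.strip (PySem.List.slice line (some (tab + 1)) none)
      if body.isEmpty then snipB_loop key max_len s'
      else PySem.List.slice body none (some max_len) ++ (if max_len < (body.length : Int) then ['…'] else [])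
    else snipB_loop key max_len s'
termination_by s.length
decreasing_by
  all_goals
    have hp : ¬ PySem.Chars.find s ('\n' :: (key ++ ['\t'])) < 0 := by assumption
    have hinf : ('\n' :: (key ++ ['\t'])) <:+: s :=
      (PySem.Chars.find_nonneg_iff s ('\n' :: (key ++ ['\t']))).mp (by omega)
    have hslen : 1 ≤ s.length := by
      rcases hinf with ⟨u, v, huv⟩
      have : s.length = ((u ++ ('\n' :: (key ++ ['\t']))) ++ v).length := by rw [huv]
      simp at this
      omega
    rw [PySem.List.slice_from _ (by simp; omega)]
    simp only [List.length_drop]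
    have : 1 ≤ (PySem.Chars.find s ('\n' :: (key ++ ['\t'])) + (('\n' :: (key ++ ['\t'])).length : Int)).toNat := by
      simp; omega
    omega

def snippet_for_user_py_alt (log : String) (uid : Int) (max_len : Int) : String :=
  String.ofList (snipB_loop (PySem.Int.toChars uid) max_len ('\n' :: log.toList))

-- ===== PRECONDITION & SPEC =====
def Spec_snippet_for_user_py (log : String) (uid : Int) (max_len : Int) (out : String) : Prop := out = snippet_for_user_py_alt log uid max_len
instance (log : String) (uid : Int) (max_len : Int) (out : String) : Decidable (Spec_snippet_for_user_py log uid max_len out) := by unfold Spec_snippet_for_user_py; infer_instance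

-- ===== CLAIM (what is proved, stated in full; the proofs are below) =====
def Claim_equal_snippet_for_user_py : Prop := ∀ (log : String) (uid : Int) (max_len : Int), Dom_snippet_for_user_py log uid max_len → Spec_snippet_for_user_py log uid max_len (snippet_for_user_py log uid max_len)

-- ===== LEMMAS AND PROOFS =====

-- the padded log as a flattening of '\n'-prefixed lines
def padOf (L : List (List Char)) : List Char := (L.map (fun l => '\n' :: l)).flatten

theorem padOf_nil : padOf [] = [] := rfl
theorem padOf_cons (l : List Char) (L : List (List Char)) : padOf (l :: L) = '\n' :: (l ++ padOf L) := by
  simp [padOf]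

theorem drop_append_ge (u v : List Char) (i : Nat) (h : u.length ≤ i) :
    List.drop i (u ++ v) = List.drop (i - u.length) v := by
  rw [List.drop_append]
  simp [List.drop_eq_nil_of_le h]

-- a sub starting with a char absent from r cannot start inside r
theorem no_start_in_prefix (c : Char) (m r t : List Char) (hc : c ∉ r) :
    ∀ i, i < r.length → ¬ (c :: m) <+: List.drop i (r ++ t) := by
  intro i hi hcon
  have hhead : (List.drop i (r ++ t)).head? = some c := by
    rcases hcon with ⟨w, hw⟩
    rw [← hw]; rfl
  rw [List.head?_drop] at hhead
  rw [List.getElem?_append_left hi, List.getElem?_eq_getElem hi] at hhead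
  have : r[i] = c := by simpa using hhead
  exact hc (this ▸ List.getElem_mem hi)

-- find of a prefix is 0
theorem find_zero_of_prefix (m s : List Char) (h : m <+: s) : PySem.Chars.find s m = 0 := by
  have hnn : 0 ≤ PySem.Chars.find s m :=
    (PySem.Chars.find_nonneg_iff s m).mpr h.isInfix
  obtain ⟨_, hmin⟩ := PySem.Chars.find_spec hnn
  by_cases hk : (PySem.Chars.find s m).toNat = 0
  · omega
  · exact absurd (by simpa using h) (hmin 0 (by omega))

-- find = -1 when the char does not occur
theorem find_no_occ (c : Char) (l : List Char) (h : c ∉ l) :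
    PySem.Chars.find l [c] = -1 := by
  rw [PySem.Chars.find_eq_neg_one_iff, List.singleton_infix_iff]
  exact h

-- shifting find across a prefix that contains no occurrence start
theorem find_shift (m r t : List Char)
    (hr : ∀ i, i < r.length → ¬ m <+: List.drop i (r ++ t)) :
    PySem.Chars.find (r ++ t) m =
      if PySem.Chars.find t m < 0 then -1 else (r.length : Int) + PySem.Chars.find t m := by
  by_cases ht : PySem.Chars.find t m < 0
  · have htne : ¬ m <:+: t := by
      intro hcon
      have := (PySem.Chars.find_nonneg_iff t m).mpr hcon
      omega
    rw [if_pos ht, PySem.Chars.find_eq_neg_one_iff]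
    intro hcon
    rcases (PySem.Chars.exists_prefix_drop_iff_isIn m (r ++ t)).mpr
      ((PySem.Chars.isIn_iff_infix m (r ++ t)).mpr hcon) with ⟨j, hj⟩
    by_cases hjr : j < r.length
    · exact hr j hjr hj
    · rw [drop_append_ge r t j (by omega)] at hj
      exact htne ((PySem.Chars.isIn_iff_infix m t).mp
        ((PySem.Chars.exists_prefix_drop_iff_isIn m t).mp ⟨_, hj⟩))
  · rw [if_neg ht]
    have htnn : 0 ≤ PySem.Chars.find t m := by omega
    obtain ⟨htpre, htmin⟩ := PySem.Chars.find_spec htnn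
    set k := (PySem.Chars.find t m).toNat with hk
    have hocc : m <+: List.drop (r.length + k) (r ++ t) := by
      rw [drop_append_ge r t _ (by omega)]
      simpa using htpre
    have hnn : 0 ≤ PySem.Chars.find (r ++ t) m := by
      apply (PySem.Chars.find_nonneg_iff (r ++ t) m).mpr
      exact (PySem.Chars.isIn_iff_infix m (r ++ t)).mp
        ((PySem.Chars.exists_prefix_drop_iff_isIn m (r ++ t)).mp ⟨_, hocc⟩)
    obtain ⟨hpre, hmin⟩ := PySem.Chars.find_spec hnn
    set K := (PySem.Chars.find (r ++ t) m).toNat with hK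
    have hKge : r.length ≤ K := by
      by_contra hlt
      exact hr K (by omega) hpre
    have hKle : K ≤ r.length + k := by
      by_contra hgt
      exact hmin (r.length + k) (by omega) hocc
    have hK2 : k ≤ K - r.length := by
      by_contra hlt
      have hnot : ¬ m <+: List.drop (K - r.length) t := htmin (K - r.length) (by omega)
      rw [drop_append_ge r t K hKge] at hpre
      exact hnot hpre
    omega

-- marker '\n'::u matches at a line start iff u is a prefix of the line
theorem marker_prefix_iff (u l t : List Char)
    (hu : '\n' ∉ u) (ht : t = [] ∨ t.head? = some '\n') :
    (('\n' :: u) <+: ('\n' :: (l ++ t))) ↔ u <+: l := by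
  constructor
  · intro h
    have h' : u <+: l ++ t := by
      rcases h with ⟨w, hw⟩
      exact ⟨w, by simpa using hw⟩
    by_cases hlen : u.length ≤ l.length
    · have heq := List.prefix_iff_eq_take.mp h'
      rw [List.take_append_of_le_length hlen] at heq
      rw [heq]
      exact List.take_prefix _ _
    · exfalso
      rcases ht with rfl | hhead
      · rw [List.append_nil] at h'
        exact hlen h'.length_le
      · have hlt : l.length < (l ++ t).length := by
          cases t with
          | nil => simp at hhead
          | cons a t' => simp
        have hul : l.length < u.length := by omega
        have hget : (l ++ t)[l.length]'hlt = '\n' := by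
          cases t with
          | nil => simp at hhead
          | cons a t' =>
            have ha : a = '\n' := by simp at hhead; exact hhead
            have hq : (l ++ a :: t')[l.length]? = some a := by
              rw [List.getElem?_append_right (le_refl _)]
              simp
            rw [List.getElem?_eq_getElem hlt] at hq
            have hv : (l ++ a :: t')[l.length]'hlt = a := by
              exact Option.some.inj hq.symm |>.symm
            rw [hv, ha]
        have hch : u[l.length]'hul = '\n' :=
          (List.IsPrefix.getElem h' (i := l.length) hul).trans hget
        exact hu (hch ▸ List.getElem_mem hul)
  · intro h
    rcases h with ⟨w, hw⟩
    exact ⟨w ++ t, by simp [← hw]⟩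

-- ——— splitOn characterization (fuel/accumulator workhorse lemmas) ———
theorem splitOn_go_acc (c : Char) (fuel : Nat) : ∀ (l cur : List Char) (acc : List (List Char)),
    PySem.Chars.splitOn.go [c] fuel l cur acc
      = acc.reverse ++ PySem.Chars.splitOn.go [c] fuel l cur [] := by
  induction fuel with
  | zero => intro l cur acc; simp [PySem.Chars.splitOn.go]
  | succ f ih =>
    intro l cur acc
    cases l with
    | nil => simp [PySem.Chars.splitOn.go]
    | cons a l' =>
      rw [PySem.Chars.splitOn.go, PySem.Chars.splitOn.go]
      by_cases hpre : [c].isPrefixOf (a :: l') = true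
      · simp only [hpre, if_true]
        rw [ih _ [] (cur.reverse :: acc), ih _ [] [cur.reverse]]
        simp
      · simp only [hpre]
        exact ih l' (a :: cur) acc

theorem splitOn_go_no_sep (c : Char) (fuel : Nat) : ∀ (l cur : List Char) (acc : List (List Char)),
    c ∉ l → PySem.Chars.splitOn.go [c] fuel l cur acc = ((cur.reverse ++ l) :: acc).reverse := by
  induction fuel with
  | zero => intro l cur acc _; rfl
  | succ f ih =>
    intro l cur acc h
    cases l with
    | nil => simp [PySem.Chars.splitOn.go]
    | cons a l' =>
      have hac : c ≠ a := fun h' => h (h' ▸ List.mem_cons_self)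
      rw [PySem.Chars.splitOn.go]
      rw [if_neg (by simp [List.isPrefixOf]; exact hac)]
      rw [ih l' (a :: cur) acc (fun hx => h (List.mem_cons_of_mem a hx))]
      simp

theorem splitOn_go_step (c : Char) : ∀ (x : List Char) (fuel : Nat) (y cur : List Char) (acc : List (List Char)),
    c ∉ x → x.length + 1 ≤ fuel →
    PySem.Chars.splitOn.go [c] fuel (x ++ c :: y) cur acc
      = PySem.Chars.splitOn.go [c] (fuel - (x.length + 1)) y [] ((cur.reverse ++ x) :: acc) := by
  intro x
  induction x with
  | nil =>
    intro fuel y cur acc _ hf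
    cases fuel with
    | zero => omega
    | succ f =>
      rw [List.nil_append, PySem.Chars.splitOn.go]
      rw [if_pos (by simp [List.isPrefixOf])]
      simp
  | cons a x' ih =>
    intro fuel y cur acc hx hf
    cases fuel with
    | zero => omega
    | succ f =>
      have hac : c ≠ a := fun h' => hx (h' ▸ List.mem_cons_self)
      rw [List.cons_append, PySem.Chars.splitOn.go]
      rw [if_neg (by simp [List.isPrefixOf]; exact hac)]
      rw [ih f y (a :: cur) acc (fun hx' => hx (List.mem_cons_of_mem a hx')) (by simp at hf ⊢; omega)]
      have harith : f + 1 - ((a :: x').length + 1) = f - (x'.length + 1) := by simp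
      rw [harith]
      simp

theorem splitOn_no_sep (c : Char) (l : List Char) (h : c ∉ l) :
    PySem.Chars.splitOn l [c] = [l] := by
  unfold PySem.Chars.splitOn
  rw [splitOn_go_no_sep c _ _ _ _ h]
  simp

theorem splitOn_cons (c : Char) (x y : List Char) (hx : c ∉ x) :
    PySem.Chars.splitOn (x ++ c :: y) [c] = x :: PySem.Chars.splitOn y [c] := by
  unfold PySem.Chars.splitOn
  rw [splitOn_go_step c x _ y [] [] hx (by simp)]
  have harith : (x ++ c :: y).length + 1 - (x.length + 1) = y.length + 1 := by simp
  rw [harith, splitOn_go_acc]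
  simp

-- first occurrence decomposition
theorem exists_first_occ (c : Char) (l : List Char) (h : c ∈ l) :
    ∃ x y, l = x ++ c :: y ∧ c ∉ x := by
  induction l with
  | nil => cases h
  | cons a l' ih =>
    by_cases hac : a = c
    · exact ⟨[], l', by simp [hac], by simp⟩
    · rcases ih (by cases h with
        | head => exact absurd rfl hac
        | tail _ h' => exact h') with ⟨x, y, hxy, hx⟩
      exact ⟨a :: x, y, by simp [hxy], by simp [hx]; exact fun h' => hac h'.symm⟩

-- the lines of log are '\n'-free and reassemble, '\n'-prefixed, into the padded log
theorem splitOn_props (n : Nat) : ∀ (l : List Char), l.length = n →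
    (∀ p ∈ PySem.Chars.splitOn l ['\n'], '\n' ∉ p) ∧
      '\n' :: l = padOf (PySem.Chars.splitOn l ['\n']) := by
  induction n using Nat.strong_induction_on with
  | _ n ih =>
    intro l hn
    by_cases h : '\n' ∈ l
    · rcases exists_first_occ '\n' l h with ⟨x, y, rfl, hx⟩
      rw [splitOn_cons '\n' x y hx]
      have hy := ih y.length (by subst hn; simp; omega) y rfl
      refine ⟨?_, ?_⟩
      · intro p hp
        cases hp with
        | head => exact hx
        | tail _ hp' => exact hy.1 p hp'
      · rw [padOf_cons, ← hy.2]
    · rw [splitOn_no_sep '\n' l h]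
      exact ⟨by intro p hp; simp at hp; exact hp ▸ h, by simp [padOf]⟩

-- '\t' and '\n' never occur in str(uid)
theorem sep_not_mem_toChars (uid : Int) (c : Char) (hc : ¬ c.isDigit) (hcm : c ≠ '-') :
    c ∉ PySem.Int.toChars uid := by
  unfold PySem.Int.toChars
  split
  · intro h
    cases h with
    | head => exact hcm rfl
    | tail _ h' =>
      exact hc (Nat.isDigit_of_mem_toDigits (by omega) (by omega) h')
  · intro h
    exact hc (Nat.isDigit_of_mem_toDigits (by omega) (by omega) h)

-- main loop lemma: B's marker search over r ++ padOf L equals A's line scan over L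
theorem main_loop (key : List Char) (max_len : Int)
    (hkn : '\n' ∉ key) :
    ∀ (L : List (List Char)) (r : List Char),
      (∀ l ∈ L, '\n' ∉ l) →
      (∀ i, i < r.length → ¬ ('\n' :: (key ++ ['\t'])) <+: List.drop i (r ++ padOf L)) →
      snipB_loop key max_len (r ++ padOf L) = snipA_go (key ++ ['\t']) max_len L := by
  intro L
  induction L with
  | nil =>
    intro r _ hr
    have hfind : PySem.Chars.find (r ++ padOf []) ('\n' :: (key ++ ['\t'])) = -1 := by
      rw [PySem.Chars.find_eq_neg_one_iff]
      intro hcon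
      rcases (PySem.Chars.exists_prefix_drop_iff_isIn _ _).mpr
        ((PySem.Chars.isIn_iff_infix _ _).mpr hcon) with ⟨j, hj⟩
      by_cases hjr : j < r.length
      · exact hr j hjr hj
      · rw [padOf_nil, List.append_nil, List.drop_eq_nil_of_le (by omega)] at hj
        exact absurd (List.prefix_nil.mp hj) (by simp)
    rw [snipB_loop]
    simp only [hfind]
    norm_num
    rfl
  | cons l L' ihL =>
    intro r hlines hr
    have hln : '\n' ∉ l := hlines l List.mem_cons_self
    have hlines' : ∀ l' ∈ L', '\n' ∉ l' := fun l' hl' => hlines l' (List.mem_cons_of_mem l hl')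
    have hhd : padOf L' = [] ∨ (padOf L').head? = some '\n' := by
      cases L' with
      | nil => left; rfl
      | cons a L'' => right; rw [padOf_cons]; rfl
    by_cases hpre : (key ++ ['\t']) <+: l
    · -- matching line: B's find lands exactly on this line's start, at index r.length
      rcases hpre with ⟨restL, hl⟩
      have hrestn : '\n' ∉ restL := by
        intro hx; exact hln (by rw [← hl]; simp [hx])
      have hpadc : padOf (l :: L') = '\n' :: (l ++ padOf L') := padOf_cons l L'
      have hmpre : ('\n' :: (key ++ ['\t'])) <+: padOf (l :: L') := by
        rw [hpadc, ← hl]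
        exact ⟨restL ++ padOf L', by simp⟩
      have hfind : PySem.Chars.find (r ++ padOf (l :: L')) ('\n' :: (key ++ ['\t'])) = (r.length : Int) := by
        rw [find_shift _ _ _ hr, find_zero_of_prefix _ _ hmpre]
        norm_num
      have hs' : PySem.List.slice (r ++ padOf (l :: L'))
          (some ((r.length : Int) + (('\n' :: (key ++ ['\t'])).length : Int))) none = restL ++ padOf L' := by
        have hcast : (r.length : Int) + (('\n' :: (key ++ ['\t'])).length : Int)
            = ((r.length + (key.length + 2) : Nat) : Int) := by simp; ring
        rw [hcast, PySem.List.slice_from_natCast]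
        have hre : r ++ padOf (l :: L') = (r ++ '\n' :: (key ++ ['\t'])) ++ (restL ++ padOf L') := by
          rw [hpadc, ← hl]; simp
        rw [hre, drop_append_ge _ _ _ (by simp)]
        have hz : r.length + (key.length + 2) - (r ++ '\n' :: (key ++ ['\t'])).length = 0 := by
          simp
        rw [hz, List.drop_zero]
      have hlineEq : (if PySem.Chars.find (restL ++ padOf L') ['\n'] < 0 then restL ++ padOf L'
            else PySem.List.slice (restL ++ padOf L') none
              (some (PySem.Chars.find (restL ++ padOf L') ['\n']))) = restL := by
        cases L' with
        | nil =>
          rw [padOf_nil, List.append_nil, find_no_occ '\n' restL hrestn]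
          norm_num
        | cons a L'' =>
          have hf2 : PySem.Chars.find (restL ++ padOf (a :: L'')) ['\n'] = (restL.length : Int) := by
            rw [find_shift _ _ _ (no_start_in_prefix '\n' [] restL (padOf (a :: L'')) hrestn)]
            rw [padOf_cons, find_zero_of_prefix ['\n'] ('\n' :: (a ++ padOf L'')) ⟨a ++ padOf L'', rfl⟩]
            norm_num
          rw [hf2, if_neg (by omega), PySem.List.slice_to_natCast, List.take_left]
      have hrA : PySem.List.slice l (some (((key ++ ['\t']).length : Nat) : Int)) none = restL := by
        rw [PySem.List.slice_from_natCast, ← hl, List.drop_left]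
      have hrec : snipB_loop key max_len (restL ++ padOf L') = snipA_go (key ++ ['\t']) max_len L' :=
        ihL restL hlines' (no_start_in_prefix '\n' (key ++ ['\t']) restL (padOf L') hrestn)
      rw [snipB_loop]
      simp only [hfind, hs', hlineEq]
      rw [if_neg (by omega)]
      rw [snipA_go]
      rw [if_pos ((PySem.Chars.startswith_iff l (key ++ ['\t'])).mpr ⟨restL, hl⟩)]
      simp only [hrA]
      by_cases htab : PySem.Chars.find restL ['\t'] < 0
      · rw [if_neg (by omega), if_pos htab]
        exact hrec
      · rw [if_pos (by omega), if_neg htab]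
        by_cases hbody : (PySem.Chars.strip (PySem.List.slice restL
            (some (PySem.Chars.find restL ['\t'] + 1)) none)).isEmpty = true
        · rw [if_pos hbody, if_pos hbody]
          exact hrec
        · rw [if_neg hbody, if_neg hbody]
    · -- field 0 of this line does not match: B's find skips over it, A skips it too
      have hassoc : r ++ padOf (l :: L') = (r ++ '\n' :: l) ++ padOf L' := by
        rw [padOf_cons]; simp
      have hr' : ∀ i, i < (r ++ '\n' :: l).length →
          ¬ ('\n' :: (key ++ ['\t'])) <+: List.drop i ((r ++ '\n' :: l) ++ padOf L') := by
        intro i hi hcon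
        rw [← hassoc] at hcon
        by_cases hir : i < r.length
        · exact hr i hir hcon
        · by_cases hieq : i = r.length
          · subst hieq
            rw [padOf_cons, drop_append_ge r _ _ (le_refl _), Nat.sub_self, List.drop_zero] at hcon
            exact hpre ((marker_prefix_iff (key ++ ['\t']) l (padOf L') (by simp; omega) hhd).mp hcon)
          · have hj : i - (r.length + 1) < l.length := by simp at hi; omega
            rw [padOf_cons] at hcon
            have : List.drop i (r ++ '\n' :: (l ++ padOf L'))
                = List.drop (i - (r.length + 1)) (l ++ padOf L') := by
              have h1 : r ++ '\n' :: (l ++ padOf L') = (r ++ ['\n']) ++ (l ++ padOf L') := by simp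
              rw [h1, drop_append_ge _ _ _ (by simp; omega)]
              simp
            rw [this] at hcon
            exact no_start_in_prefix '\n' (key ++ ['\t']) l (padOf L') hln _ hj hcon
      rw [hassoc, ihL (r ++ '\n' :: l) hlines' hr']
      rw [snipA_go]
      rw [if_neg ?hsw]
      case hsw =>
        intro hcon
        exact hpre ((PySem.Chars.startswith_iff l (key ++ ['\t'])).mp hcon)

-- ===== VERDICT (by name: the statement is the Claim_ definition above) =====
theorem snippet_for_user_py_spec : Claim_equal_snippet_for_user_py := by
  intro log uid max_len _
  unfold Spec_snippet_for_user_py snippet_for_user_py snippet_for_user_py_alt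
  obtain ⟨hfree, hpad⟩ := splitOn_props log.toList.length log.toList rfl
  have hkn : '\n' ∉ PySem.Int.toChars uid :=
    sep_not_mem_toChars uid '\n' (by decide) (by decide)
  have := main_loop (PySem.Int.toChars uid) max_len hkn
    (PySem.Chars.splitOn log.toList ['\n']) [] hfree (by intro i hi; simp at hi)
  rw [List.nil_append, ← hpad] at this
  rw [this]
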